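-- pv_equiv track=rewrite | github.com/khan-debug/citizenWorkingBot | multi_agents.py | _extract_specific_needs
-- ===== SOURCE A (Python) =====
-- from typing import Dict, List, Any
--
-- def _extract_specific_needs(issue_lower: str) -> List[str]:
--     """Extract specific needs from the user issue."""
--     needs = []
--
--     if any(word in issue_lower for word in ["urgent", "emergency", "immediate", "asap"]):
--         needs.append("urgent_assistance")
--
--     if any(word in issue_lower for word in ["financial", "money", "cash", "income"]):
--         needs.append("financial_support")
--
--     if any(word in issue_lower for word in ["family", "children", "kids"]):
--         needs.append("family_support")
--
--     if any(word in issue_lower for word in ["medical", "health", "treatment"]):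
--         needs.append("healthcare_support")
--
--     if any(word in issue_lower for word in ["education", "school", "study"]):
--         needs.append("education_support")
--
--     return needs if needs else ["general_assistance"]
-- ===== SOURCE B (Python) =====
-- from typing import List
--
-- # keyword -> tag, flattened
-- _KEYWORD_TAGS = [
--     ("urgent", "urgent_assistance"), ("emergency", "urgent_assistance"),
--     ("immediate", "urgent_assistance"), ("asap", "urgent_assistance"),
--     ("financial", "financial_support"), ("money", "financial_support"),
--     ("cash", "financial_support"), ("income", "financial_support"),
--     ("family", "family_support"), ("children", "family_support"),
--     ("kids", "family_support"),
--     ("medical", "healthcare_support"), ("health", "healthcare_support"),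
--     ("treatment", "healthcare_support"),
--     ("education", "education_support"), ("school", "education_support"),
--     ("study", "education_support"),
-- ]
--
-- _TAG_ORDER = ["urgent_assistance", "financial_support", "family_support",
--               "healthcare_support", "education_support"]
--
-- def _extract_specific_needs(issue_lower: str) -> List[str]:
--     """Single left-to-right scan of the text: at each position collect the
--     tags of all keywords starting there, then emit tags in canonical order."""
--     found = set()
--     for i in range(len(issue_lower)):
--         for kw, tag in _KEYWORD_TAGS:
--             if issue_lower.startswith(kw, i):
--                 found.add(tag)
--     needs = [t for t in _TAG_ORDER if t in found]
--     return needs if needs else ["general_assistance"]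
-- ===== Notes on version B (the rewrite author's own statement) =====
-- stated objective: alternative
-- what changed: Instead of five per-group substring searches, B makes a single left-to-right scan over text positions, matching a flattened keyword->tag table at each position into a found-set, then emits tags in canonical order.
import Mathlib
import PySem

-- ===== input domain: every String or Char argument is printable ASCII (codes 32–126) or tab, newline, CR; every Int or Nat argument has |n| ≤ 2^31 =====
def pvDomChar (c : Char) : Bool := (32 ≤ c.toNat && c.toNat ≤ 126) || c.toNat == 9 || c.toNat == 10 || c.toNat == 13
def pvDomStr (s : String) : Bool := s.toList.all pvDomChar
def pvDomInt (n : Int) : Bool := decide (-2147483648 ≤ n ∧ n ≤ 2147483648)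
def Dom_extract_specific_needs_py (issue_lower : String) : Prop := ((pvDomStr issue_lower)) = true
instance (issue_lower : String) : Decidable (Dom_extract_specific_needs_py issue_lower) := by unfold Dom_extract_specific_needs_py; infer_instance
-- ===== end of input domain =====

-- B replaces A's five independent per-group substring searches by a single left-to-right
-- scan over text positions against a flattened keyword->tag table (alternative; same cost).

-- ===== PORT A =====
def extract_specific_needs_py (issue_lower : String) : List String :=
  let needs : List String := []
  let needs := if (["urgent", "emergency", "immediate", "asap"].any
      (fun word => PySem.Str.isIn word issue_lower)) then needs ++ ["urgent_assistance"] else needs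
  let needs := if (["financial", "money", "cash", "income"].any
      (fun word => PySem.Str.isIn word issue_lower)) then needs ++ ["financial_support"] else needs
  let needs := if (["family", "children", "kids"].any
      (fun word => PySem.Str.isIn word issue_lower)) then needs ++ ["family_support"] else needs
  let needs := if (["medical", "health", "treatment"].any
      (fun word => PySem.Str.isIn word issue_lower)) then needs ++ ["healthcare_support"] else needs
  let needs := if (["education", "school", "study"].any
      (fun word => PySem.Str.isIn word issue_lower)) then needs ++ ["education_support"] else needs
  if needs ≠ [] then needs else ["general_assistance"]

-- ===== PORT B =====
-- flattened keyword -> tag table (_KEYWORD_TAGS in Source B); keywords as char lists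
def kwTags : List (List Char × String) :=
  [ ("urgent".toList, "urgent_assistance"), ("emergency".toList, "urgent_assistance"),
    ("immediate".toList, "urgent_assistance"), ("asap".toList, "urgent_assistance"),
    ("financial".toList, "financial_support"), ("money".toList, "financial_support"),
    ("cash".toList, "financial_support"), ("income".toList, "financial_support"),
    ("family".toList, "family_support"), ("children".toList, "family_support"),
    ("kids".toList, "family_support"),
    ("medical".toList, "healthcare_support"), ("health".toList, "healthcare_support"),
    ("treatment".toList, "healthcare_support"),
    ("education".toList, "education_support"), ("school".toList, "education_support"),
    ("study".toList, "education_support") ]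

def tagOrder : List String :=
  ["urgent_assistance", "financial_support", "family_support",
   "healthcare_support", "education_support"]

-- the positional scan: 'for i in range(len(s)): for kw, tag in _KEYWORD_TAGS: if s.startswith(kw, i): found.add(tag)'
def scanSuffixes : List Char → PySem.Set String → PySem.Set String
  | [], found => found
  | c :: rest, found =>
      scanSuffixes rest
        (kwTags.foldl
          (fun f r => if PySem.Chars.startswith (c :: rest) r.1 then PySem.Set.add f r.2 else f)
          found)

def extract_specific_needs_py_alt (issue_lower : String) : List String :=
  let found := scanSuffixes issue_lower.toList PySem.Set.empty
  let needs := tagOrder.filter (fun t => PySem.Set.contains found t)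
  if needs ≠ [] then needs else ["general_assistance"]

-- ===== PRECONDITION & SPEC =====
def Spec_extract_specific_needs_py (issue_lower : String) (out : List String) : Prop := out = extract_specific_needs_py_alt issue_lower
instance (issue_lower : String) (out : List String) : Decidable (Spec_extract_specific_needs_py issue_lower out) := by unfold Spec_extract_specific_needs_py; infer_instance

-- ===== CLAIM (what is proved, stated in full; the proofs are below) =====
def Claim_equal_extract_specific_needs_py : Prop := ∀ (issue_lower : String), Dom_extract_specific_needs_py issue_lower → Spec_extract_specific_needs_py issue_lower (extract_specific_needs_py issue_lower)

-- ===== LEMMAS AND PROOFS =====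

-- membership after one inner fold over the rule table
theorem mem_foldl_rules (rules : List (List Char × String)) (l : List Char)
    (f0 : PySem.Set String) (t : String) :
    (t ∈ rules.foldl
        (fun f r => if PySem.Chars.startswith l r.1 then PySem.Set.add f r.2 else f) f0)
      ↔ t ∈ f0 ∨ ∃ r ∈ rules, PySem.Chars.startswith l r.1 = true ∧ r.2 = t := by
  induction rules generalizing f0 with
  | nil => simp
  | cons r rs ih =>
      simp only [List.foldl_cons]
      by_cases h : PySem.Chars.startswith l r.1 = true
      · simp [h, ih, PySem.Set.mem_add]
        tauto
      · simp only [if_neg h, ih, List.mem_cons]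
        constructor
        · rintro (hf | ⟨q, hq, hs, ht⟩)
          · exact Or.inl hf
          · exact Or.inr ⟨q, Or.inr hq, hs, ht⟩
        · rintro (hf | ⟨q, (rfl | hq), hs, ht⟩)
          · exact Or.inl hf
          · exact absurd hs h
          · exact Or.inr ⟨q, hq, hs, ht⟩

-- membership in the found-set after the full positional scan
theorem mem_scanSuffixes (l : List Char) (f : PySem.Set String) (t : String) :
    (t ∈ scanSuffixes l f)
      ↔ t ∈ f ∨ ∃ r ∈ kwTags, r.2 = t ∧ ∃ j, r.1 <+: l.drop j := by
  induction l generalizing f with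
  | nil =>
      simp only [scanSuffixes, List.drop_nil]
      constructor
      · exact Or.inl
      · rintro (hf | ⟨r, hr, ht, j, hp⟩)
        · exact hf
        · exfalso
          have hnil : r.1 = [] := List.prefix_nil.mp hp
          fin_cases hr <;> simp at hnil
  | cons c rest ih =>
      simp only [scanSuffixes, ih, mem_foldl_rules]
      constructor
      · rintro ((hf | ⟨r, hr, hs, ht⟩) | ⟨r, hr, ht, j, hp⟩)
        · exact Or.inl hf
        · exact Or.inr ⟨r, hr, ht, 0, by
            simpa using (PySem.Chars.startswith_iff _ _).mp hs⟩
        · exact Or.inr ⟨r, hr, ht, j + 1, by simpa using hp⟩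
      · rintro (hf | ⟨r, hr, ht, j, hp⟩)
        · exact Or.inl (Or.inl hf)
        · cases j with
          | zero =>
              exact Or.inl (Or.inr ⟨r, hr, (PySem.Chars.startswith_iff _ _).mpr (by simpa using hp), ht⟩)
          | succ j =>
              exact Or.inr ⟨r, hr, ht, j, by simpa using hp⟩

-- a tag is found iff one of its keywords occurs in the text
theorem mem_scan_iff_isIn (s : List Char) (t : String) :
    (t ∈ scanSuffixes s PySem.Set.empty)
      ↔ ∃ r ∈ kwTags, r.2 = t ∧ PySem.Chars.isIn r.1 s = true := by
  rw [mem_scanSuffixes]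
  simp only [PySem.Set.empty, List.not_mem_nil, false_or]
  constructor
  · rintro ⟨r, hr, ht, j, hp⟩
    exact ⟨r, hr, ht, (PySem.Chars.exists_prefix_drop_iff_isIn _ _).mp ⟨j, hp⟩⟩
  · rintro ⟨r, hr, ht, hin⟩
    obtain ⟨j, hp⟩ := (PySem.Chars.exists_prefix_drop_iff_isIn _ _).mpr hin
    exact ⟨r, hr, ht, j, hp⟩

theorem contains_scan (s : List Char) (t : String) :
    PySem.Set.contains (scanSuffixes s PySem.Set.empty) t
      = (kwTags.any (fun r => decide (r.2 = t) && PySem.Chars.isIn r.1 s)) := by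
  rcases h : (kwTags.any (fun r => decide (r.2 = t) && PySem.Chars.isIn r.1 s)) with _ | _
  · simp only [List.any_eq_false, Bool.and_eq_true, not_and, decide_eq_true_eq] at h
    rcases hc : PySem.Set.contains (scanSuffixes s PySem.Set.empty) t with _ | _
    · rfl
    · exfalso
      obtain ⟨r, hr, ht, hin⟩ :=
        (mem_scan_iff_isIn s t).mp ((PySem.Set.contains_iff _ _).mp hc)
      exact absurd hin (by simpa [ht] using h r hr)
  · simp only [List.any_eq_true, Bool.and_eq_true, decide_eq_true_eq] at h
    obtain ⟨r, hr, ht, hin⟩ := h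
    exact (PySem.Set.contains_iff _ _).mpr ((mem_scan_iff_isIn s t).mpr ⟨r, hr, ht, hin⟩)

-- the two program shapes, abstracted over the five group booleans
def pvBuildA (g1 g2 g3 g4 g5 : Bool) : List String :=
  let needs : List String := []
  let needs := if g1 then needs ++ ["urgent_assistance"] else needs
  let needs := if g2 then needs ++ ["financial_support"] else needs
  let needs := if g3 then needs ++ ["family_support"] else needs
  let needs := if g4 then needs ++ ["healthcare_support"] else needs
  let needs := if g5 then needs ++ ["education_support"] else needs
  if needs ≠ [] then needs else ["general_assistance"]

def pvBuildB (g1 g2 g3 g4 g5 : Bool) : List String :=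
  let n5 := if g5 then ["education_support"] else []
  let n4 := if g4 then "healthcare_support" :: n5 else n5
  let n3 := if g3 then "family_support" :: n4 else n4
  let n2 := if g2 then "financial_support" :: n3 else n3
  let needs := if g1 then "urgent_assistance" :: n2 else n2
  if needs ≠ [] then needs else ["general_assistance"]

theorem pvBuild_eq (g1 g2 g3 g4 g5 : Bool) :
    pvBuildA g1 g2 g3 g4 g5 = pvBuildB g1 g2 g3 g4 g5 := by
  revert g1 g2 g3 g4 g5; decide

theorem A_eq (s : String) : extract_specific_needs_py s =
    pvBuildA
      (["urgent", "emergency", "immediate", "asap"].any (fun w => PySem.Str.isIn w s))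
      (["financial", "money", "cash", "income"].any (fun w => PySem.Str.isIn w s))
      (["family", "children", "kids"].any (fun w => PySem.Str.isIn w s))
      (["medical", "health", "treatment"].any (fun w => PySem.Str.isIn w s))
      (["education", "school", "study"].any (fun w => PySem.Str.isIn w s)) := rfl

theorem B_eq (s : String) : extract_specific_needs_py_alt s =
    pvBuildB
      (PySem.Set.contains (scanSuffixes s.toList PySem.Set.empty) "urgent_assistance")
      (PySem.Set.contains (scanSuffixes s.toList PySem.Set.empty) "financial_support")
      (PySem.Set.contains (scanSuffixes s.toList PySem.Set.empty) "family_support")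
      (PySem.Set.contains (scanSuffixes s.toList PySem.Set.empty) "healthcare_support")
      (PySem.Set.contains (scanSuffixes s.toList PySem.Set.empty) "education_support") := by
  unfold extract_specific_needs_py_alt tagOrder pvBuildB
  simp only [List.filter_cons, List.filter_nil]

theorem cond_urgent (s : String) :
    PySem.Set.contains (scanSuffixes s.toList PySem.Set.empty) "urgent_assistance"
      = (["urgent", "emergency", "immediate", "asap"].any (fun w => PySem.Str.isIn w s)) := by
  rw [contains_scan]; unfold kwTags; simp

theorem cond_financial (s : String) :
    PySem.Set.contains (scanSuffixes s.toList PySem.Set.empty) "financial_support"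
      = (["financial", "money", "cash", "income"].any (fun w => PySem.Str.isIn w s)) := by
  rw [contains_scan]; unfold kwTags; simp

theorem cond_family (s : String) :
    PySem.Set.contains (scanSuffixes s.toList PySem.Set.empty) "family_support"
      = (["family", "children", "kids"].any (fun w => PySem.Str.isIn w s)) := by
  rw [contains_scan]; unfold kwTags; simp

theorem cond_health (s : String) :
    PySem.Set.contains (scanSuffixes s.toList PySem.Set.empty) "healthcare_support"
      = (["medical", "health", "treatment"].any (fun w => PySem.Str.isIn w s)) := by
  rw [contains_scan]; unfold kwTags; simp

theorem cond_edu (s : String) :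
    PySem.Set.contains (scanSuffixes s.toList PySem.Set.empty) "education_support"
      = (["education", "school", "study"].any (fun w => PySem.Str.isIn w s)) := by
  rw [contains_scan]; unfold kwTags; simp

-- ===== VERDICT (by name: the statement is the Claim_ definition above) =====
theorem extract_specific_needs_py_spec : Claim_equal_extract_specific_needs_py := by
  intro s _
  show extract_specific_needs_py s = extract_specific_needs_py_alt s
  rw [A_eq, B_eq, cond_urgent, cond_financial, cond_family, cond_health, cond_edu,
    pvBuild_eq]
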